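-- pv_equiv track=rewrite | github.com/VhispDobola/windsurf-project-3 | core/progression_system.py | canonical_boss_id_from_name
-- ===== SOURCE A (Python) =====
-- def canonical_boss_id_from_name(name):
--     normalized = (name or "").strip().lower()
--     slug = []
--     last_was_sep = False
--     for char in normalized:
--         if char.isalnum():
--             slug.append(char)
--             last_was_sep = False
--         elif not last_was_sep:
--             slug.append("_")
--             last_was_sep = True
--     return "".join(slug).strip("_")
-- ===== SOURCE B (Python) =====
-- def canonical_boss_id_from_name(name):
--     normalized = (name or "").strip().lower()
--     masked = "".join(c if c.isalnum() else " " for c in normalized)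
--     return "_".join(masked.split())
-- ===== Notes on version B (the rewrite author's own statement) =====
-- stated objective: idiomatic
-- what changed: B masks every non-alphanumeric character to a space and then uses str.split() (which collapses runs and drops edges) plus '_'.join, replacing A's stateful loop with its last_was_sep flag and the final strip('_').
import Mathlib
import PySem

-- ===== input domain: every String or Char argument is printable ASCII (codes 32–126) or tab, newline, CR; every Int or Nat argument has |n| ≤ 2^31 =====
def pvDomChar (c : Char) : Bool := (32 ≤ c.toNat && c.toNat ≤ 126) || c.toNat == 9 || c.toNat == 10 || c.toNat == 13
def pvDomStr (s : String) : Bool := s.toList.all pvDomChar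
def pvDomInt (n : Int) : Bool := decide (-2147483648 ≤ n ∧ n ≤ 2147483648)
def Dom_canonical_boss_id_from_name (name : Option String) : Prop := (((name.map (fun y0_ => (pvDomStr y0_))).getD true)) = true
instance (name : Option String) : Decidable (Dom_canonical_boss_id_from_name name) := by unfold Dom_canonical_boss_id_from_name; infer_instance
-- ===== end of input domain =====

-- B masks non-alphanumerics to spaces and uses split()/join, replacing A's separator flag
-- and final edge-stripping; same cost, more idiomatic.


-- ===== PORT A =====
def canonical_boss_id_from_name (name : Option String) : String :=
  let normalized := PySem.Chars.lower (PySem.Chars.strip (name.getD "").toList)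
  let st := normalized.foldl
    (fun (st : List Char × Bool) c =>
      if PySem.Chars.isalnum c then (st.1 ++ [c], false)
      else if st.2 = false then (st.1 ++ ['_'], true)
      else st)
    ([], false)
  String.ofList (PySem.Chars.stripChars st.1 ['_'])

-- ===== PORT B =====
def canonical_boss_id_from_name_alt (name : Option String) : String :=
  let normalized := PySem.Chars.lower (PySem.Chars.strip (name.getD "").toList)
  let masked := normalized.map (fun c => if PySem.Chars.isalnum c then c else ' ')
  String.ofList (PySem.Chars.join ['_'] (PySem.Chars.split₀ masked))

-- ===== PRECONDITION & SPEC =====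
def Spec_canonical_boss_id_from_name (name : Option String) (out : String) : Prop := out = canonical_boss_id_from_name_alt name
instance (name : Option String) (out : String) : Decidable (Spec_canonical_boss_id_from_name name out) := by unfold Spec_canonical_boss_id_from_name; infer_instance

-- ===== CLAIM (what is proved, stated in full; the proofs are below) =====
def Claim_equal_canonical_boss_id_from_name : Prop := ∀ (name : Option String), Dom_canonical_boss_id_from_name name → Spec_canonical_boss_id_from_name name (canonical_boss_id_from_name name)

-- ===== LEMMAS AND PROOFS =====

-- A's loop step
def pvStepA (st : List Char × Bool) (c : Char) : List Char × Bool :=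
  if PySem.Chars.isalnum c then (st.1 ++ [c], false)
  else if st.2 = false then (st.1 ++ ['_'], true)
  else st

-- reference token builder (proof device shared by both directions)
def pvStepB (st : List (List Char) × List Char) (c : Char) : List (List Char) × List Char :=
  if PySem.Chars.isalnum c then (st.1, st.2 ++ [c])
  else if st.2 ≠ [] then (st.1 ++ [st.2], [])
  else st

-- finalization: flush the buffer
def pvFin (st : List (List Char) × List Char) : List (List Char) :=
  if st.2 ≠ [] then st.1 ++ [st.2] else st.1

-- what A's slug looks like, in terms of the token state (without the possible leading '_')
def pvEmit (toks : List (List Char)) (buf : List Char) (sep : Bool) : List Char :=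
  PySem.Chars.join ['_'] (pvFin (toks, buf)) ++
    (if sep ∧ toks ≠ [] then ['_'] else [])

theorem pvStripChars_eq (s : List Char) :
    PySem.Chars.stripChars s ['_'] =
      (List.dropWhile (fun c => (['_'] : List Char).contains c)
        (List.dropWhile (fun c => (['_'] : List Char).contains c) s).reverse).reverse := rfl

theorem pvJoin_snoc (ts : List (List Char)) (b : List Char) :
    PySem.Chars.join ['_'] (ts ++ [b]) =
      PySem.Chars.join ['_'] ts ++ (if ts = [] then [] else ['_']) ++ b := by
  induction ts with
  | nil => simp [PySem.Chars.join, List.intercalate]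
  | cons t ts ih =>
    cases ts with
    | nil => simp [PySem.Chars.join, List.intercalate, List.intersperse]
    | cons u us =>
      simp only [PySem.Chars.join, List.intercalate, List.cons_append,
        List.intersperse_cons₂, List.flatten_cons] at *
      simp [ih]

theorem pvJoin_snoc_append (ts : List (List Char)) (b : List Char) (c : Char) :
    PySem.Chars.join ['_'] (ts ++ [b]) ++ [c] =
      PySem.Chars.join ['_'] (ts ++ [b ++ [c]]) := by
  rw [pvJoin_snoc, pvJoin_snoc]; simp

-- join of nonempty '_'-free tokens: no '_' at either end
theorem pvJoin_head_last (ts : List (List Char)) (hne : ts ≠ [])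
    (h1 : ∀ t ∈ ts, t ≠ []) (h2 : ∀ t ∈ ts, '_' ∉ t) :
    ∃ x xs y, PySem.Chars.join ['_'] ts = x :: xs ∧ x ≠ '_' ∧
      (PySem.Chars.join ['_'] ts).getLast? = some y ∧ y ≠ '_' := by
  induction ts with
  | nil => exact absurd rfl hne
  | cons t ts ih =>
    have ht : t ≠ [] := h1 t (by simp)
    have htm : '_' ∉ t := h2 t (by simp)
    cases ts with
    | nil =>
      obtain ⟨x, xs, rfl⟩ := List.exists_cons_of_ne_nil ht
      refine ⟨x, xs, (x :: xs).getLast (by simp), ?_, ?_, ?_, ?_⟩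
      · simp [PySem.Chars.join, List.intercalate]
      · intro h; exact htm (h ▸ List.mem_cons_self)
      · simp [PySem.Chars.join, List.intercalate, List.getLast?_eq_some_getLast]
      · intro h; exact htm (h ▸ List.getLast_mem (by simp))
    | cons u us =>
      obtain ⟨x, xs, y, hxl, hx, hyl, hy⟩ := ih (by simp)
        (fun a ha => h1 a (List.mem_cons_of_mem _ ha))
        (fun a ha => h2 a (List.mem_cons_of_mem _ ha))
      obtain ⟨z, zs, rfl⟩ := List.exists_cons_of_ne_nil ht
      have hjoin : PySem.Chars.join ['_'] ((z :: zs) :: u :: us) =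
          (z :: zs) ++ '_' :: PySem.Chars.join ['_'] (u :: us) := by
        simp [PySem.Chars.join, List.intercalate, List.intersperse_cons₂]
      refine ⟨z, zs ++ '_' :: PySem.Chars.join ['_'] (u :: us), y, ?_, ?_, ?_, hy⟩
      · simp [hjoin]
      · intro h; exact htm (h ▸ List.mem_cons_self)
      · rw [hjoin, List.getLast?_append]
        simp [hxl ▸ hyl, hxl]

theorem pvRev_head (x : Char) (xs : List Char) (y : Char)
    (hyl : (x :: xs).getLast? = some y) :
    ∃ zs, (x :: xs).reverse = y :: zs := by
  rw [List.getLast?_eq_head?_reverse] at hyl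
  cases h : (x :: xs).reverse with
  | nil => rw [h] at hyl; simp at hyl
  | cons a as => rw [h] at hyl; simp at hyl; exact ⟨as, by rw [hyl]⟩

theorem pvStripChars_sandwich (us vs s : List Char)
    (hu : ∀ c ∈ us, c = '_') (hv : ∀ c ∈ vs, c = '_')
    (hx : ∃ x xs y, s = x :: xs ∧ x ≠ '_' ∧ s.getLast? = some y ∧ y ≠ '_') :
    PySem.Chars.stripChars (us ++ s ++ vs) ['_'] = s := by
  obtain ⟨x, xs, y, rfl, hxne, hyl, hyne⟩ := hx
  rw [pvStripChars_eq]
  have hleft : List.dropWhile (fun c => (['_'] : List Char).contains c) (us ++ (x :: xs) ++ vs)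
      = x :: (xs ++ vs) := by
    rw [List.append_assoc, List.dropWhile_append]
    have hus : List.dropWhile (fun c => (['_'] : List Char).contains c) us = [] := by
      rw [List.dropWhile_eq_nil_iff]; intro c hc; simp [hu c hc]
    simp only [hus, List.isEmpty_nil, if_true]
    rw [List.cons_append, List.dropWhile_cons_of_neg (by simp [hxne])]
  rw [hleft]
  have hright : List.dropWhile (fun c => (['_'] : List Char).contains c) (x :: (xs ++ vs)).reverse
      = (x :: xs).reverse := by
    have heq : (x :: (xs ++ vs)).reverse = vs.reverse ++ (x :: xs).reverse := by simp
    rw [heq, List.dropWhile_append]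
    have hvs : List.dropWhile (fun c => (['_'] : List Char).contains c) vs.reverse = [] := by
      rw [List.dropWhile_eq_nil_iff]; intro c hc; simp [hv c (List.mem_reverse.mp hc)]
    simp only [hvs, List.isEmpty_nil, if_true]
    obtain ⟨zs, hz⟩ := pvRev_head x xs y hyl
    rw [hz, List.dropWhile_cons_of_neg (by simp [hyne]), ← hz]
  rw [hright, List.reverse_reverse]

-- how A's slug expression evolves on an alphanumeric character
theorem pvEmit_alnum (toks : List (List Char)) (buf : List Char) (sep : Bool) (c : Char)
    (hsep : sep = true → buf = []) (hsf : sep = false → buf = [] → toks = []) :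
    pvEmit toks buf sep ++ [c] = pvEmit toks (buf ++ [c]) false := by
  by_cases hb : buf = []
  · subst hb
    cases sep with
    | false =>
      have htk := hsf rfl rfl; subst htk
      simp [pvEmit, pvFin, PySem.Chars.join, List.intercalate]
    | true =>
      by_cases htk : toks = []
      · subst htk; simp [pvEmit, pvFin, PySem.Chars.join, List.intercalate]
      · simp [pvEmit, pvFin, htk, pvJoin_snoc]
  · have hsepf : sep = false := by
      cases sep with
      | false => rfl
      | true => exact absurd (hsep rfl) hb
    subst hsepf
    simp [pvEmit, pvFin, hb, ← pvJoin_snoc_append]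

-- how A's slug expression evolves on a flushing separator
theorem pvEmit_flush (toks : List (List Char)) (buf : List Char) (hb : buf ≠ []) :
    pvEmit toks buf false ++ ['_'] = pvEmit (toks ++ [buf]) [] true := by
  simp [pvEmit, pvFin, hb]

-- A's loop, related to the reference token builder
theorem pvLoop (l : List Char) : ∀ (lead : List Char) (toks : List (List Char))
    (buf : List Char) (sep : Bool),
    (∀ c ∈ lead, c = '_') →
    (sep = true → buf = []) →
    (sep = false → buf = [] → toks = [] ∧ lead = []) →
    (∀ t ∈ toks, t ≠ []) → (∀ t ∈ toks, '_' ∉ t) → '_' ∉ buf →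
    PySem.Chars.stripChars (l.foldl pvStepA (lead ++ pvEmit toks buf sep, sep)).1 ['_']
      = PySem.Chars.join ['_'] (pvFin (l.foldl pvStepB (toks, buf) )) := by
  induction l with
  | nil =>
    intro lead toks buf sep hlead hsep hsf h1 h2 h3
    simp only [List.foldl_nil]
    by_cases hfin : pvFin (toks, buf) = []
    · have hbuf : buf = [] := by
        by_contra hb; simp [pvFin, hb] at hfin
      have htoks : toks = [] := by subst hbuf; simpa [pvFin] using hfin
      subst hbuf htoks
      rw [show pvEmit [] [] sep = [] by simp [pvEmit, pvFin, PySem.Chars.join, List.intercalate]]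
      rw [List.append_nil, hfin, pvStripChars_eq]
      have hld : List.dropWhile (fun c => (['_'] : List Char).contains c) lead = [] := by
        rw [List.dropWhile_eq_nil_iff]; intro c hc; simp [hlead c hc]
      rw [hld]
      simp [PySem.Chars.join, List.intercalate]
    · have hne : ∀ t ∈ pvFin (toks, buf), t ≠ [] := by
        intro t ht
        simp only [pvFin] at ht
        split at ht
        · rcases List.mem_append.mp ht with h | h
          · exact h1 t h
          · exact (by simpa using h : t = buf) ▸ (by assumption)
        · exact h1 t ht
      have hnu : ∀ t ∈ pvFin (toks, buf), '_' ∉ t := by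
        intro t ht
        simp only [pvFin] at ht
        split at ht
        · rcases List.mem_append.mp ht with h | h
          · exact h2 t h
          · exact (by simpa using h : t = buf) ▸ h3
        · exact h2 t ht
      have hj := pvJoin_head_last (pvFin (toks, buf)) hfin hne hnu
      unfold pvEmit
      rw [← List.append_assoc]
      exact pvStripChars_sandwich lead _ (PySem.Chars.join ['_'] (pvFin (toks, buf))) hlead
        (by split <;> simp) hj
  | cons c l ih =>
    intro lead toks buf sep hlead hsep hsf h1 h2 h3
    simp only [List.foldl_cons]
    by_cases hal : PySem.Chars.isalnum c = true
    · have hcne : c ≠ '_' := by intro h; subst h; revert hal; decide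
      have hstA : pvStepA (lead ++ pvEmit toks buf sep, sep) c
          = (lead ++ pvEmit toks (buf ++ [c]) false, false) := by
        simp only [pvStepA, hal, if_pos]
        refine Prod.ext ?_ rfl
        rw [List.append_assoc]
        rw [pvEmit_alnum toks buf sep c hsep (fun h1 h2 => (hsf h1 h2).1)]
      have hstB : pvStepB (toks, buf) c = (toks, buf ++ [c]) := by
        simp [pvStepB, hal]
      rw [hstA, hstB]
      exact ih lead toks (buf ++ [c]) false hlead (by simp)
        (by simp) h1 h2 (by simp [h3, Ne.symm hcne])
    · by_cases hb : buf = []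
      · subst hb
        cases sep with
        | true =>
          have hstA : pvStepA (lead ++ pvEmit toks [] true, true) c
              = (lead ++ pvEmit toks [] true, true) := by
            simp [pvStepA, hal]
          have hstB : pvStepB (toks, []) c = (toks, []) := by
            simp [pvStepB, hal]
          rw [hstA, hstB]
          exact ih lead toks [] true hlead (fun _ => rfl)
            (by simp) h1 h2 (by simp)
        | false =>
          obtain ⟨htk, hld⟩ := hsf rfl rfl
          subst htk hld
          have hstA : pvStepA ([] ++ pvEmit [] [] false, false) c
              = (['_'] ++ pvEmit [] [] true, true) := by
            simp [pvStepA, hal, pvEmit, pvFin, PySem.Chars.join, List.intercalate]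
          have hstB : pvStepB (([] : List (List Char)), ([] : List Char)) c = ([], []) := by
            simp [pvStepB, hal]
          rw [hstA, hstB]
          exact ih ['_'] [] [] true (by simp) (fun _ => rfl)
            (by simp) (by simp) (by simp) (by simp)
      · have hsepf : sep = false := by
          cases sep with
          | false => rfl
          | true => exact absurd (hsep rfl) hb
        subst hsepf
        have hstA : pvStepA (lead ++ pvEmit toks buf false, false) c
            = (lead ++ pvEmit (toks ++ [buf]) [] true, true) := by
          simp [pvStepA, hal, List.append_assoc, pvEmit_flush _ _ hb]
        have hstB : pvStepB (toks, buf) c = (toks ++ [buf], []) := by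
          simp [pvStepB, hal, hb]
        rw [hstA, hstB]
        refine ih lead (toks ++ [buf]) [] true hlead (fun _ => rfl) (by simp) ?_ ?_ (by simp)
        · intro t ht
          rcases List.mem_append.mp ht with h | h
          · exact h1 t h
          · exact (by simpa using h : t = buf) ▸ hb
        · intro t ht
          rcases List.mem_append.mp ht with h | h
          · exact h2 t h
          · exact (by simpa using h : t = buf) ▸ h3

-- an alphanumeric character (ASCII letter or digit) is never Python whitespace
theorem pv_alnum_not_space (c : Char) (h : PySem.Chars.isalnum c = true) :
    PySem.Chars.isspace c = false := by
  simp only [PySem.Chars.isalnum, PySem.Chars.isalpha, PySem.Chars.isdigit,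
    PySem.Chars.isupper, PySem.Chars.islower, PySem.Chars.isspace,
    Bool.or_eq_true, Bool.and_eq_true, decide_eq_true_eq, Char.le_def,
    UInt32.le_iff_toNat_le] at *
  simp only [Bool.or_eq_false_iff, Bool.and_eq_false_iff, decide_eq_false_iff_not]
  have hA : ('A' : Char).val.toNat = 65 := rfl
  have hZ : ('Z' : Char).val.toNat = 90 := rfl
  have ha : ('a' : Char).val.toNat = 97 := rfl
  have hz : ('z' : Char).val.toNat = 122 := rfl
  have h0 : ('0' : Char).val.toNat = 48 := rfl
  have h9 : ('9' : Char).val.toNat = 57 := rfl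
  have hcv : c.toNat = c.val.toNat := rfl
  rcases h with (h | h) | h <;>
    · obtain ⟨h1, h2⟩ := h
      omega

-- B's split of the masked string computes exactly the reference tokens
theorem pvSplitGo (l : List Char) : ∀ (toks : List (List Char)) (buf : List Char),
    PySem.Chars.split₀.go (l.map (fun c => if PySem.Chars.isalnum c then c else ' '))
        buf.reverse toks.reverse
      = pvFin (l.foldl pvStepB (toks, buf)) := by
  induction l with
  | nil =>
    intro toks buf
    by_cases hb : buf = []
    · subst hb; simp [PySem.Chars.split₀.go, pvFin]
    · simp [PySem.Chars.split₀.go, pvFin, hb, List.isEmpty_iff]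
  | cons c l ih =>
    intro toks buf
    simp only [List.map_cons, List.foldl_cons]
    by_cases hal : PySem.Chars.isalnum c = true
    · have hsp := pv_alnum_not_space c hal
      have hm : (if PySem.Chars.isalnum c then c else ' ') = c := by simp [hal]
      rw [hm]
      rw [show PySem.Chars.split₀.go (c :: l.map (fun c => if PySem.Chars.isalnum c then c else ' '))
            buf.reverse toks.reverse
          = PySem.Chars.split₀.go (l.map (fun c => if PySem.Chars.isalnum c then c else ' '))
            (c :: buf.reverse) toks.reverse by
        simp [PySem.Chars.split₀.go, hsp]]
      rw [show (c :: buf.reverse) = (buf ++ [c]).reverse by simp]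
      rw [ih toks (buf ++ [c])]
      simp [pvStepB, hal]
    · have hsp : PySem.Chars.isspace ' ' = true := by decide
      have hm : (if PySem.Chars.isalnum c then c else ' ') = ' ' := by simp [hal]
      rw [hm]
      by_cases hb : buf = []
      · subst hb
        rw [show PySem.Chars.split₀.go (' ' :: l.map (fun c => if PySem.Chars.isalnum c then c else ' '))
              ([] : List Char).reverse toks.reverse
            = PySem.Chars.split₀.go (l.map (fun c => if PySem.Chars.isalnum c then c else ' '))
              ([] : List Char).reverse toks.reverse by
          simp [PySem.Chars.split₀.go, hsp]]
        rw [show pvStepB (toks, []) c = (toks, []) by simp [pvStepB, hal]]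
        exact ih toks []
      · rw [show PySem.Chars.split₀.go (' ' :: l.map (fun c => if PySem.Chars.isalnum c then c else ' '))
              buf.reverse toks.reverse
            = PySem.Chars.split₀.go (l.map (fun c => if PySem.Chars.isalnum c then c else ' '))
              ([] : List Char).reverse (buf.reverse.reverse :: toks.reverse) by
          simp only [PySem.Chars.split₀.go, hsp, if_pos]
          rw [if_neg (by simp [List.isEmpty_iff, hb])]
          rfl]
        rw [show (buf.reverse.reverse :: toks.reverse) = (toks ++ [buf]).reverse by simp]
        rw [ih (toks ++ [buf]) []]
        rw [show pvStepB (toks, buf) c = (toks ++ [buf], []) by simp [pvStepB, hal, hb]]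

theorem pvSplit_eq (l : List Char) :
    PySem.Chars.split₀ (l.map (fun c => if PySem.Chars.isalnum c then c else ' '))
      = pvFin (l.foldl pvStepB (([] : List (List Char)), ([] : List Char))) := by
  have := pvSplitGo l [] []
  simpa [PySem.Chars.split₀] using this

-- ===== VERDICT (by name: the statement is the Claim_ definition above) =====
theorem canonical_boss_id_from_name_spec : Claim_equal_canonical_boss_id_from_name := by
  intro name _
  unfold Spec_canonical_boss_id_from_name
  simp only [canonical_boss_id_from_name, canonical_boss_id_from_name_alt]
  rw [pvSplit_eq]
  exact congrArg String.ofList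
    (pvLoop (PySem.Chars.lower (PySem.Chars.strip (name.getD "").toList))
      [] [] [] false (by simp) (by simp) (fun _ _ => ⟨rfl, rfl⟩) (by simp) (by simp) (by simp))
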